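-- pv_equiv track=rewrite | github.com/zaydzuhri/Tucil3_13520144 | bin/FifteenPuzzle.py | kurang
-- ===== SOURCE A (Python) =====
-- def kurang(i, puzzle):
--     count = 0
--     found = False
--     for row in range(0, 4):
--         for col in range(0, 4):
--             if (not found):
--                 found = puzzle[row][col] == i
--             else:
--                 if (puzzle[row][col] < i):
--                     count += 1
--     return count
-- ===== SOURCE B (Python) =====
-- def kurang(i, puzzle):
--     flat = [puzzle[r][c] for r in range(4) for c in range(4)]
--     if i not in flat:
--         return 0
--     idx = flat.index(i)
--     return sum(1 for x in flat[idx + 1:] if x < i)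
-- ===== Notes on version B (the rewrite author's own statement) =====
-- stated objective: simpler
-- what changed: Replaces A's single stateful 4x4 scan with a found-flag by a flatten-then-locate-then-count decomposition: flatten the 16 cells, find the first index of i, count smaller values in the suffix after it.
import Mathlib
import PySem

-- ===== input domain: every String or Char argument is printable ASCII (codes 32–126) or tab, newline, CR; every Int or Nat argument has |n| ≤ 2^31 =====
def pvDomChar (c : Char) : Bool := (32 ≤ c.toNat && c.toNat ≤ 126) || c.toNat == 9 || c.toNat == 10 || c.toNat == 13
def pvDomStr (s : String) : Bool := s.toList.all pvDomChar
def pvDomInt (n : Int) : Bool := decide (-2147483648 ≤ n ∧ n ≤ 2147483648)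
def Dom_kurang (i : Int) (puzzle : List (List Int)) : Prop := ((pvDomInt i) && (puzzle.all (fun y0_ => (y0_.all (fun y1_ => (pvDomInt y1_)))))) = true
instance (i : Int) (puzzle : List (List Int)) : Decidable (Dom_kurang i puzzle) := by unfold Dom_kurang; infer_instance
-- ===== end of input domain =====

-- B replaces A's single stateful found-flag scan by a flatten / locate / count-suffix
-- decomposition (objective: simpler); equivalence is about the return value.

-- ===== PORT A =====
-- puzzle[row][col]; the default 0 is never reached under Pre_kurang (Python raises there).
def pvCell (puzzle : List (List Int)) (r c : Int) : Int :=
  (PySem.List.pyGet? ((PySem.List.pyGet? puzzle r).getD []) c).getD 0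

-- loop body of A: state (count, found), branches in A's order
def kurangStep (i : Int) (st : Int × Bool) (v : Int) : Int × Bool :=
  if !st.2 then (st.1, v == i)
  else if v < i then (st.1 + 1, st.2)
  else st

def kurang (i : Int) (puzzle : List (List Int)) : Int :=
  ((PySem.List.pyRange 0 4 1).foldl (fun st row =>
    (PySem.List.pyRange 0 4 1).foldl (fun st col =>
      kurangStep i st (pvCell puzzle row col)) st) ((0 : Int), false)).1

-- ===== PORT B =====
-- flat = [puzzle[r][c] for r in range(4) for c in range(4)]
def pvFlat (puzzle : List (List Int)) : List Int :=
  (PySem.List.pyRange 0 4 1).flatMap (fun r =>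
    (PySem.List.pyRange 0 4 1).map (fun c => pvCell puzzle r c))

def kurang_alt (i : Int) (puzzle : List (List Int)) : Int :=
  let flat := pvFlat puzzle
  if flat.contains i then
    match PySem.List.index? flat i with
    | some idx =>
        (((PySem.List.slice flat (some ((idx : Int) + 1)) none).filter
            (fun x => decide (x < i))).length : Int)
    | none => 0
  else 0

-- ===== PRECONDITION & SPEC =====
-- Pre_ excludes exactly the inputs on which Python A raises IndexError:
-- fewer than 4 rows, or one of the first 4 rows shorter than 4.
def Pre_kurang (i : Int) (puzzle : List (List Int)) : Prop :=
  4 ≤ puzzle.length ∧ ∀ row ∈ puzzle.take 4, 4 ≤ row.length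
instance (i : Int) (puzzle : List (List Int)) : Decidable (Pre_kurang i puzzle) := by
  unfold Pre_kurang; infer_instance

def pvWitness_kurang : Int × List (List Int) :=
  (5, [[1,2,3,4],[5,6,7,8],[9,10,11,12],[13,14,15,0]])

def Spec_kurang (i : Int) (puzzle : List (List Int)) (out : Int) : Prop := out = kurang_alt i puzzle
instance (i : Int) (puzzle : List (List Int)) (out : Int) : Decidable (Spec_kurang i puzzle out) := by
  unfold Spec_kurang; infer_instance

-- ===== CLAIM (what is proved, stated in full; the proofs are below) =====
def Claim_equal_kurang : Prop := ∀ (i : Int) (puzzle : List (List Int)), Dom_kurang i puzzle → Pre_kurang i puzzle → Spec_kurang i puzzle (kurang i puzzle)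

-- ===== LEMMAS AND PROOFS =====

lemma pyRange04 : PySem.List.pyRange 0 4 1 = [0, 1, 2, 3] := by decide

-- once found, A counts every remaining value < i
lemma foldTrue (i : Int) : ∀ (l : List Int) (c : Int),
    l.foldl (kurangStep i) (c, true) =
      (c + ((l.filter (fun x => decide (x < i))).length : Int), true) := by
  intro l
  induction l with
  | nil => intro c; simp
  | cons x xs ih =>
    intro c
    by_cases hx : x < i <;>
      simp [List.foldl, kurangStep, hx, ih, List.filter] <;> ring

-- A's whole pass over a list, characterised by the first index of i
lemma foldFalse (i : Int) : ∀ (l : List Int) (c : Int),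
    (l.foldl (kurangStep i) (c, false)).1 =
      c + (match PySem.List.index? l i with
           | some idx => (((l.drop (idx + 1)).filter (fun x => decide (x < i))).length : Int)
           | none => 0) := by
  intro l
  induction l with
  | nil => intro c; simp [PySem.List.index?_eq_idxOf?, List.idxOf?]
  | cons x xs ih =>
    intro c
    by_cases hx : x = i
    · subst hx
      rw [PySem.List.index?_cons_self]
      simp [List.foldl, kurangStep, foldTrue]
    · have h1 : PySem.List.index? (x :: xs) i = (PySem.List.index? xs i).map (· + 1) :=
        PySem.List.index?_cons_of_ne xs hx
      rw [h1]
      have hstep : kurangStep i (c, false) x = (c, false) := by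
        simp [kurangStep, hx]
      rw [List.foldl_cons, hstep, ih]
      cases PySem.List.index? xs i with
      | none => simp
      | some idx => simp [List.drop_succ_cons]

lemma kurang_eq_fold (i : Int) (puzzle : List (List Int)) :
    kurang i puzzle = ((pvFlat puzzle).foldl (kurangStep i) ((0 : Int), false)).1 := by
  simp [kurang, pvFlat, pyRange04, List.flatMap, List.foldl]

-- ===== VERDICT (by name: the statement is the Claim_ definition above) =====
theorem kurang_spec : Claim_equal_kurang := by
  intro i puzzle _ _
  show kurang i puzzle = kurang_alt i puzzle
  rw [kurang_eq_fold, foldFalse]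
  unfold kurang_alt
  cases h : PySem.List.index? (pvFlat puzzle) i with
  | none =>
    have hmem : i ∉ pvFlat puzzle := (PySem.List.index?_eq_none_iff _ _).mp h
    simp only [h]
    simp [hmem]
  | some idx =>
    have hmem : i ∈ pvFlat puzzle := by
      have := (PySem.List.index?_isSome_iff (pvFlat puzzle) i).mp
      rw [h] at this; exact this rfl
    have hs : PySem.List.slice (pvFlat puzzle) (some ((idx : Int) + 1)) none =
        (pvFlat puzzle).drop (idx + 1) := by
      have hcast : ((idx : Int) + 1) = ((idx + 1 : Nat) : Int) := by push_cast; ring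
      rw [hcast, PySem.List.slice_from_natCast]
    simp only [h]
    simp [hmem, hs]
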